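-- pv_equiv track=rewrite | github.com/eafit-201620002010/ST0247-032 | proyecto/Entrega2/prueba.py | calcular_minimo
-- ===== SOURCE A (Python) =====
-- import math
--
-- def calcular_minimo(inicial,coordenadas):
--     #hypot(x,y)
--     #sqrt(x*x + y*y)
--     minimo = math.hypot(coordenadas[0][0] - inicial[0], coordenadas[0][1] - inicial[1])
--     mini=coordenadas[0]
--     for i in range(len(coordenadas)):
--     	temp = math.hypot(coordenadas[i][0] - inicial[0], coordenadas[i][1] - inicial[1])
--     	if min(minimo, temp) == temp:
--     		minimo = temp
--     		mini = i
--     return mini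
-- ===== SOURCE B (Python) =====
-- def calcular_minimo(inicial, coordenadas):
--     dists = [(cx - inicial[0]) ** 2 + (cy - inicial[1]) ** 2 for cx, cy in coordenadas]
--     return dists.index(min(dists))
-- ===== Notes on version B (the rewrite author's own statement) =====
-- stated objective: simpler
-- what changed: A's fused running-min index loop with float math.hypot comparisons is replaced by a build-the-squared-distance-table / min / index lookup; Pre_ excludes the empty list (A raises IndexError), ties at the minimal distance (A happens to return the last minimal index, B the first - either is defensible), and near-equal unequal distances where hypot's double rounding makes A's float comparison diverge from exact comparison.
-- outside the precondition, e.g. on calcular_minimo((0, 0), [(0, 1), (1, 0)]): A returns 1, B returns 0; on calcular_minimo((0, 0), [(2147483648, 0), (2147483648, 1)]): A returns 1, B returns 0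
import Mathlib
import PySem

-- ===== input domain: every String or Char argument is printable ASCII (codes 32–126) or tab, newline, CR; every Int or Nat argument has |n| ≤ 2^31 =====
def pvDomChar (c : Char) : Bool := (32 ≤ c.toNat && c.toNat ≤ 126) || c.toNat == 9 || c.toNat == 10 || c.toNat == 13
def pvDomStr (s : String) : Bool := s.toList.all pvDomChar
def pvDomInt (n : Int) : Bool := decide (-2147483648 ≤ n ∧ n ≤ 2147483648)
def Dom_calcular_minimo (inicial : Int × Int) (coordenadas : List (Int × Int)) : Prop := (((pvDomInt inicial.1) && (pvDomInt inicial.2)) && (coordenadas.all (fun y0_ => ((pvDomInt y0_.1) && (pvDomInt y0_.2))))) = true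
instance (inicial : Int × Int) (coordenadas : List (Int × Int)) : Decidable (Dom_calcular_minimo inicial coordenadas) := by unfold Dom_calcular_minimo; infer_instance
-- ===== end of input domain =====

-- B replaces A's fused running-min index loop (float math.hypot comparisons) by a
-- build-squared-distance-table / min / first-index-lookup decomposition (objective: simpler).

-- ===== PORT A =====
-- math.hypot is used by A only inside comparisons; it is ported as the exact integer
-- squared distance (sqrt is strictly monotone).  This is exact on Pre_, which excludes
-- the inputs where two unequal squared distances are so close that hypot's double
-- rounding could merge or misorder them.
def pvSqd (inicial c : Int × Int) : Int :=
  (c.1 - inicial.1) ^ 2 + (c.2 - inicial.2) ^ 2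

def calcular_minimo (inicial : Int × Int) (coordenadas : List (Int × Int)) : Int :=
  -- minimo = hypot(coordenadas[0][0]-inicial[0], coordenadas[0][1]-inicial[1]); IndexError on [] is excluded by Pre_
  let minimo := pvSqd inicial (PySem.List.pyGetD coordenadas 0 ((0 : Int), (0 : Int)))
  -- Python's initial `mini = coordenadas[0]` is always overwritten at i = 0 (temp == minimo there),
  -- so it is modeled by the unreachable sentinel -1.
  ((PySem.List.pyRange 0 (PySem.List.len coordenadas) 1).foldl
    (fun (s : Int × Int) i =>
      let temp := pvSqd inicial (PySem.List.pyGetD coordenadas i ((0 : Int), (0 : Int)))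
      if temp ≤ s.1 then (temp, i) else s)   -- `min(minimo,temp) == temp` ⟺ temp ≤ minimo
    (minimo, -1)).2

-- ===== PORT B =====
def calcular_minimo_alt (inicial : Int × Int) (coordenadas : List (Int × Int)) : Int :=
  let dists := coordenadas.map (fun c => pvSqd inicial c)
  match PySem.List.min? dists (fun d => d) with
  | none => -1        -- min([]) raises ValueError in Python; excluded by Pre_
  | some m =>
      match PySem.List.index? dists m with
      | some k => (k : Int)   -- dists.index(m); m ∈ dists, so ValueError is unreachable
      | none => -1

-- ===== PRECONDITION & SPEC =====
-- Pre_ excludes (a) the empty list, on which both programs raise (A IndexError, B ValueError);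
-- (b) lists in which the minimal squared distance is achieved by more than one coordinate,
-- where A happens to return the LAST minimal index and B the first — an accidental tie-break
-- either side of which is defensible; and (c) lists containing two coordinates whose squared
-- distances to inicial are unequal but relatively closer than 2^-48, where math.hypot's double
-- rounding can merge or misorder the two floats so that A's comparisons no longer agree with
-- exact comparison.
def Pre_calcular_minimo (inicial : Int × Int) (coordenadas : List (Int × Int)) : Prop :=
  coordenadas ≠ [] ∧
  (∀ p ∈ coordenadas, ∀ q ∈ coordenadas,
    ((p.1 - inicial.1) ^ 2 + (p.2 - inicial.2) ^ 2 = (q.1 - inicial.1) ^ 2 + (q.2 - inicial.2) ^ 2) ∨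
      2 ^ 48 * |((p.1 - inicial.1) ^ 2 + (p.2 - inicial.2) ^ 2) - ((q.1 - inicial.1) ^ 2 + (q.2 - inicial.2) ^ 2)| >
        max ((p.1 - inicial.1) ^ 2 + (p.2 - inicial.2) ^ 2) ((q.1 - inicial.1) ^ 2 + (q.2 - inicial.2) ^ 2)) ∧
  (coordenadas.filter (fun p => decide (∀ q ∈ coordenadas,
      (p.1 - inicial.1) ^ 2 + (p.2 - inicial.2) ^ 2 ≤ (q.1 - inicial.1) ^ 2 + (q.2 - inicial.2) ^ 2))).length = 1
instance (inicial : Int × Int) (coordenadas : List (Int × Int)) : Decidable (Pre_calcular_minimo inicial coordenadas) := by unfold Pre_calcular_minimo; infer_instance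

def pvWitness_calcular_minimo : (Int × Int) × (List (Int × Int)) := ((0, 0), [(3, 4), (1, 1)])

def Spec_calcular_minimo (inicial : Int × Int) (coordenadas : List (Int × Int)) (out : Int) : Prop := out = calcular_minimo_alt inicial coordenadas
instance (inicial : Int × Int) (coordenadas : List (Int × Int)) (out : Int) : Decidable (Spec_calcular_minimo inicial coordenadas out) := by unfold Spec_calcular_minimo; infer_instance

-- ===== CLAIM (what is proved, stated in full; the proofs are below) =====
def Claim_equal_calcular_minimo : Prop := ∀ (inicial : Int × Int) (coordenadas : List (Int × Int)), Dom_calcular_minimo inicial coordenadas → Pre_calcular_minimo inicial coordenadas → Spec_calcular_minimo inicial coordenadas (calcular_minimo inicial coordenadas)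

-- ===== LEMMAS AND PROOFS =====

-- running minimum of a list of distances, seeded with m0
def pvM (m0 : Int) (ds : List Int) : Int := ds.foldl (fun m d => min m d) m0

-- last index (counting from s) whose value equals m, with default j0
def pvJ (m j0 s : Int) (ds : List Int) : Int :=
  (PySem.List.enumerate ds s).foldl (fun acc p => if p.2 = m then p.1 else acc) j0

-- A's loop body as a fold over the enumerated distance list
def pvF (st : Int × Int) (s : Int) (ds : List Int) : Int × Int :=
  (PySem.List.enumerate ds s).foldl (fun st p => if p.2 ≤ st.1 then (p.2, p.1) else st) st

-- list of indices (counting from s) whose value equals m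
def pvIdxs (m s : Int) (ds : List Int) : List Int :=
  (PySem.List.enumerate ds s).filterMap (fun p => if p.2 = m then some p.1 else none)

theorem pvM_append (m0 : Int) (t : List Int) (a : Int) :
    pvM m0 (t ++ [a]) = min (pvM m0 t) a := by
  simp [pvM]

theorem pvM_le (m0 : Int) (ds : List Int) : pvM m0 ds ≤ m0 := by
  induction ds generalizing m0 with
  | nil => simp [pvM]
  | cons d t ih =>
      have := ih (min m0 d)
      simp only [pvM, List.foldl_cons] at this ⊢
      exact le_trans this (min_le_left _ _)

theorem pvM_of_not_any (m0 : Int) (ds : List Int) (h : ¬ ds.any (fun d => d ≤ m0)) :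
    pvM m0 ds = m0 := by
  induction ds generalizing m0 with
  | nil => simp [pvM]
  | cons d t ih =>
      simp only [List.any_cons, Bool.or_eq_true, decide_eq_true_eq] at h
      push Not at h
      have hd : min m0 d = m0 := by omega
      simp only [pvM, List.foldl_cons, hd]
      exact ih m0 (by simpa using h.2)

theorem pvJ_append (m j0 s : Int) (t : List Int) (a : Int) :
    pvJ m j0 s (t ++ [a]) = if a = m then s + t.length else pvJ m j0 s t := by
  simp [pvJ, PySem.List.enumerate_append]

theorem pvF_append (st : Int × Int) (s : Int) (t : List Int) (a : Int) :
    pvF st s (t ++ [a]) =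
      (let u := pvF st s t; if a ≤ u.1 then (a, s + t.length) else u) := by
  simp [pvF, PySem.List.enumerate_append]

theorem pvIdxs_append (m s : Int) (t : List Int) (a : Int) :
    pvIdxs m s (t ++ [a]) =
      pvIdxs m s t ++ (if a = m then [s + t.length] else []) := by
  by_cases h : a = m <;> simp [pvIdxs, PySem.List.enumerate_append, h]

theorem pv_mem_pvIdxs (m s : Int) (ds : List Int) (j : Int) :
    j ∈ pvIdxs m s ds ↔ ∃ (k : Nat) (_ : k < ds.length), j = s + k ∧ ds[k] = m := by
  simp only [pvIdxs, List.mem_filterMap]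
  constructor
  · rintro ⟨p, hp, hpj⟩
    rw [PySem.List.mem_enumerate_iff] at hp
    obtain ⟨k, hk, rfl⟩ := hp
    by_cases h : ds[k] = m <;> simp [h] at hpj
    exact ⟨k, hk, hpj.symm, h⟩
  · rintro ⟨k, hk, rfl, hm⟩
    refine ⟨(s + k, ds[k]), ?_, by simp [hm]⟩
    rw [PySem.List.mem_enumerate_iff]
    exact ⟨k, hk, rfl⟩

theorem pvIdxs_cons (m s d : Int) (t : List Int) :
    pvIdxs m s (d :: t) = (if d = m then [s] else []) ++ pvIdxs m (s + 1) t := by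
  by_cases h : d = m <;> simp [pvIdxs, PySem.List.enumerate_cons, h]

theorem pvIdxs_length (f : Int × Int → Int) (m : Int) (coords : List (Int × Int)) :
    ∀ s, (pvIdxs m s (coords.map f)).length =
      (coords.filter (fun p => decide (f p = m))).length := by
  induction coords with
  | nil => intro s; simp [pvIdxs, PySem.List.enumerate_nil]
  | cons c t ih =>
      intro s
      simp only [List.map_cons, pvIdxs_cons, List.filter_cons]
      by_cases h : f c = m <;> simp [h, ih (s + 1)]

-- closed form of A's fold
theorem pvF_eq (ds : List Int) : ∀ (m0 j0 s : Int), ds ≠ [] →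
    pvF (m0, j0) s ds =
      (pvM m0 ds,
       if ds.any (fun d => d ≤ m0) then pvJ (pvM m0 ds) j0 s ds else j0) := by
  induction ds using List.reverseRecOn with
  | nil => intro _ _ _ h; exact absurd rfl h
  | append_singleton t a ih =>
      intro m0 j0 s _
      rcases List.eq_nil_or_concat' t with rfl | ht
      · simp only [List.nil_append, pvF, pvM, pvJ, PySem.List.enumerate_cons,
          PySem.List.enumerate_nil, List.foldl_cons, List.foldl_nil, List.any_cons,
          List.any_nil, Bool.or_false, decide_eq_true_eq]
        by_cases h : a ≤ m0
        · have : min m0 a = a := by omega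
          simp [h]
        · have : min m0 a = m0 := by omega
          simp [h, this]
      · have htne : t ≠ [] := by rcases ht with ⟨l, x, rfl⟩; simp
        rw [pvF_append, ih m0 j0 s htne, pvM_append, pvJ_append]
        simp only []
        by_cases h1 : a ≤ pvM m0 t
        · have hmin : min (pvM m0 t) a = a := by omega
          have ham0 : a ≤ m0 := le_trans h1 (pvM_le m0 t)
          have hany : (t ++ [a]).any (fun d => d ≤ m0) = true := by
            simp [List.any_append, ham0]
          simp [h1, hany]
        · have hmin : min (pvM m0 t) a = pvM m0 t := by omega
          by_cases h2 : t.any (fun d => d ≤ m0)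
          · have hane : ¬ a = pvM m0 t := by omega
            have hany : (t ++ [a]).any (fun d => d ≤ m0) = true := by
              simp [List.any_append, h2]
            simp [h1, hmin, h2, hany, hane]
          · have hm0 : pvM m0 t = m0 := pvM_of_not_any m0 t (by simpa using h2)
            have ham0 : ¬ a ≤ m0 := by omega
            have hany : ¬ (t ++ [a]).any (fun d => d ≤ m0) = true := by
              simp [List.any_append, ham0, h2]
            simp [h1, hmin, h2, hany]

-- pvJ lands in pvIdxs whenever m occurs in ds
theorem pvJ_spec (ds : List Int) : ∀ (m j0 s : Int), m ∈ ds →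
    pvJ m j0 s ds ∈ pvIdxs m s ds := by
  induction ds using List.reverseRecOn with
  | nil => intro m j0 s h; simp at h
  | append_singleton t a ih =>
      intro m j0 s hm
      rw [pvJ_append, pvIdxs_append]
      by_cases h : a = m
      · simp [h]
      · have hmt : m ∈ t := by
          rcases List.mem_append.mp hm with h' | h'
          · exact h'
          · simp at h'; exact absurd h'.symm h
        simp only [if_neg h, List.append_nil]
        exact ih m j0 s hmt

-- A's port, rewritten through pvF over the distance list
theorem pv_enumerate_map {α β : Type} (f : α → β) (l : List α) (s : Int) :
    PySem.List.enumerate (l.map f) s = (PySem.List.enumerate l s).map (fun p => (p.1, f p.2)) := by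
  induction l generalizing s with
  | nil => simp [PySem.List.enumerate_nil]
  | cons x t ih => simp [PySem.List.enumerate_cons, ih]

theorem pvA_eq (inicial : Int × Int) (coordenadas : List (Int × Int)) :
    calcular_minimo inicial coordenadas =
      (pvF (pvSqd inicial (PySem.List.pyGetD coordenadas 0 ((0 : Int), (0 : Int))), -1) 0
        (coordenadas.map (fun c => pvSqd inicial c))).2 := by
  unfold calcular_minimo pvF
  rw [pv_enumerate_map, List.foldl_map,
    PySem.List.enumerate_eq_map_pyRange coordenadas ((0 : Int), (0 : Int)), List.foldl_map]

-- ===== VERDICT (by name: the statement is the Claim_ definition above) =====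
theorem calcular_minimo_spec : Claim_equal_calcular_minimo := by
  intro inicial coordenadas _ hpre
  unfold Spec_calcular_minimo
  obtain ⟨hne, -, huniq⟩ := hpre
  rcases List.exists_cons_of_ne_nil hne with ⟨c, rest, rfl⟩
  set f : Int × Int → Int := fun c => pvSqd inicial c with hf
  have hd0 : PySem.List.pyGetD (c :: rest) 0 ((0 : Int), (0 : Int)) = c := by
    simp [PySem.List.pyGetD, PySem.List.pyGet?, PySem.List.pyIdx?]
  set ds : List Int := (c :: rest).map f with hds
  have hdsne : ds ≠ [] := by simp [hds]
  -- the minimum of the distance table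
  have hmin : PySem.List.min? ds (fun d => d) = some (List.foldl min (f c) (rest.map f)) := by
    simp only [hds, List.map_cons]
    exact PySem.List.min?_id_cons (f c) (rest.map f)
  have hM : pvM (f c) ds = List.foldl min (f c) (rest.map f) := by
    simp [pvM, hds, min_self]
  set m : Int := pvM (f c) ds with hm
  have hmin' : PySem.List.min? ds (fun d => d) = some m := by rw [hmin, ← hM]
  have hmem : m ∈ ds := PySem.List.min?_mem hmin'
  have hisMin : ∀ d ∈ ds, m ≤ d := fun d hd => PySem.List.min?_isMin hmin' d hd
  -- the uniqueness hypothesis, rewritten to the distance table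
  have hpred : ∀ p ∈ (c :: rest),
      (decide (∀ q ∈ (c :: rest),
        (p.1 - inicial.1) ^ 2 + (p.2 - inicial.2) ^ 2 ≤ (q.1 - inicial.1) ^ 2 + (q.2 - inicial.2) ^ 2))
      = decide (f p = m) := by
    intro p hp
    have hfp : f p ∈ ds := by rw [hds]; exact List.mem_map_of_mem hp
    simp only [decide_eq_decide]
    constructor
    · intro hall
      obtain ⟨q, hq, hqm⟩ := by rw [hds] at hmem; exact List.mem_map.mp hmem
      have h1 := hall q hq
      have h2 := hisMin (f p) hfp
      simp only [hf, pvSqd] at h1 h2 hqm ⊢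
      omega
    · intro hpm q hq
      have hfq : f q ∈ ds := by rw [hds]; exact List.mem_map_of_mem hq
      have := hisMin (f q) hfq
      simp only [hf, pvSqd] at hpm this ⊢
      omega
  have hlen : (pvIdxs m 0 ds).length = 1 := by
    rw [hds, pvIdxs_length f m (c :: rest) 0, List.filter_congr (fun p hp => (hpred p hp).symm)]
    exact huniq
  obtain ⟨j, hj⟩ : ∃ j, pvIdxs m 0 ds = [j] := List.length_eq_one_iff.mp hlen
  -- A's value is pvJ, which lies in the singleton pvIdxs
  have hA : calcular_minimo inicial (c :: rest) = (pvF (f c, -1) 0 ds).2 := by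
    rw [pvA_eq, hd0]
  have hanyA : ds.any (fun d => d ≤ f c) = true := by
    simp only [hds, List.map_cons, List.any_cons]; simp
  have hAj : calcular_minimo inicial (c :: rest) = j := by
    rw [hA, pvF_eq ds (f c) (-1) 0 hdsne, hanyA]
    have := pvJ_spec ds m (-1) 0 hmem
    rw [hj] at this
    simpa [← hm] using this
  -- B's value is the first index of m, which also lies in the singleton pvIdxs
  obtain ⟨k, hk⟩ : ∃ k, PySem.List.index? ds m = some k := by
    have := (PySem.List.index?_isSome_iff (xs := ds) (v := m)).mpr hmem
    exact Option.isSome_iff_exists.mp this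
  obtain ⟨hklt, hkm, -⟩ := PySem.List.getElem_of_index?_eq_some hk
  have hkj : (k : Int) = j := by
    have : (0 : Int) + k ∈ pvIdxs m 0 ds :=
      (pv_mem_pvIdxs m 0 ds _).mpr ⟨k, hklt, rfl, hkm⟩
    rw [hj] at this; simpa using this
  rw [hAj]
  unfold calcular_minimo_alt
  simp only [← hf, ← hds, hmin', hk]
  exact hkj.symm
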